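-- pv_equiv track=rewrite | github.com/pypi-data/pypi-mirror-325 | packages/badidatetime/badidatetime-0.1.0-py3-none-any.whl/badidatetime/badi_calendar.py | _get_coff
-- ===== SOURCE A (Python) =====
-- def _get_coff(year: int) -> int:
--     """
--     Generate the coefficients for correcting Badí' vernal equinox dates.
--
--     .. note::
--
--        | General ranges are determined with:
--        | ./contrib/misc/badi_jd_tests.py -p -S start_year -E end_year
--
--        Where -S is the 1st year and -E is the nth year + 1 that needs to
--        be process. Use the following command to test the results of each
--        segment.
--        ./contrib/misc/badi_jd_tests.py -qXS start_year -E end_year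
--
--        Full range is -1842 to 1161.
--
--     :param int year: The year to find a coefficient for.
--     :return: The coefficient.
--     :rtype: int
--     """
--     def process_segment(y, a=0, onoff0=(), b=0, onoff1=()):
--         func = lambda y, onoff: 0 < y < 100 and y % 4 in onoff
--         coff = 0
--
--         if a and func(y, onoff0):    # Whatever is passed in onoff0.
--             coff = a
--         elif b and func(y, onoff1):  # Whatever is passed in onoff1.
--             coff = b
--
--         return coff
--
--     def process_segments(year, pn, a=0, onoff0=(), b=0, onoff1=()):
--         coff = 0
--
--         for start, end in pn:
--             if year in range(start, end):
--                 # Start to end (range -S start -E end)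
--                 coff0 = process_segment(end - year, a=a, onoff0=onoff0)
--                 coff1 = process_segment(end - year, b=b, onoff1=onoff1)
--                 coff = coff0 if coff0 != 0 else coff1
--
--         return coff
--
--     p1 = ((-1783, -1747), (-1651, -1615), (-1499, -1483), (-1383, -1347),
--           (-1251, -1215), (-1099, -1083), (-983, -947), (-851, -815),
--           (-699, -683), (-583, -547), (-451, -415), (-299, -283),
--           (-179, -143), (-47, -11), (101, 117), (213, 249), (345, 381),
--           (501, 513), (609, 645), (741, 777), (901, 909), (1005, 1041),
--           (1137, 1162))
--     p1100 = ((-1699, -1683), (-1299, -1283), (-899, -883), (-499, -483),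
--              (-99, -79), (301, 313), (701, 709), (1101, 1105))
--     p1110 = ((-1799, -1783), (-1683, -1651), (-1399, -1383),
--              (-1283, -1251), (-999, -983), (-883, -851), (-599, -583),
--              (-483, -451), (-199, -179), (-79, -47), (201, 213),
--              (313, 345), (601, 609), (709, 741), (1001, 1005),
--              (1105, 1137))
--     p2 = ((-1519, -1499), (-1119, -1099), (-319, -299), (-719, -699),
--           (85, 101), (477, 501), (873, 901))
--     p2111 = ((-1747, -1715), (-1615, -1583), (-1483, -1451),
--              (-1347, -1315), (-1327, -1315), (-1215, -1183),
--              (-1083, -1051), (-947, -915), (-815, -783), (-683, -651),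
--              (-547, -515), (-415, -383), (-283, -243), (-143, -111),
--              (-11, 21), (117, 149), (249, 281), (381, 413), (513, 545),
--              (645, 677), (777, 809), (909, 941), (1041, 1073))
--     p2211 = ((-1843, -1815), (-1715, -1699), (-1583, -1551),
--              (-1451, -1435), (-1435, -1415), (-1315, -1299),
--              (-1183, -1151), (-1051, -1019), (-915, -899), (-783, -751),
--              (-651, -619), (-515, -499), (-383, -351), (-243, -211),
--              (-111, -99), (21, 53), (149, 185), (281, 301), (413, 445),
--              (545, 577), (677, 701), (809, 841), (941, 973), (1073, 1101))
--     p2221 = ((-1815, -1799), (-1551, -1519), (-1415, -1399),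
--              (-1151, -1119), (-1019, -999), (-751, -719), (-619, -599),
--              (-351, -319), (-211, -199), (53, 85), (185, 201), (445, 477),
--              (577, 601), (841, 873), (973, 1001))
--     coff = 0
--
--     if not coff:
--         coff = process_segments(year, p1, -1, (0, 1, 2, 3))
--
--     if not coff:
--         coff = process_segments(year, p1100, -1, (0, 3))
--
--     if not coff:
--         coff = process_segments(year, p1110, -1, (0, 2, 3))
--
--     if not coff:
--         coff = process_segments(year, p2, -2, (0, 1, 2, 3))
--
--     if not coff:
--         coff = process_segments(year, p2111, -2, (0,), -1, (1, 2, 3))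
--
--     if not coff:
--         coff = process_segments(year, p2211, -2, (0, 3), -1, (1, 2))
--
--     if not coff:
--         coff = process_segments(year, p2221, -2, (0, 2, 3), -1, (1,))
--
--     return coff
-- ===== SOURCE B (Python) =====
-- # Binary search over one sorted disjoint interval table instead of seven
-- # sequential linear passes.  The 115 intervals of A's seven tables are pairwise
-- # disjoint (the one nested duplicate (-1327,-1315) in p2111 carries the same end
-- # and coefficients as its enclosing (-1347,-1315) and is merged away), so at most
-- # one record can contain a given year and a rightmost-start binary search finds it.
-- # Records: (start, end, a, onoff0, b, onoff1), sorted by start.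
-- _RECORDS = (
--     (-1843, -1815, -2, (0, 3), -1, (1, 2)),
--     (-1815, -1799, -2, (0, 2, 3), -1, (1,)),
--     (-1799, -1783, -1, (0, 2, 3), 0, ()),
--     (-1783, -1747, -1, (0, 1, 2, 3), 0, ()),
--     (-1747, -1715, -2, (0,), -1, (1, 2, 3)),
--     (-1715, -1699, -2, (0, 3), -1, (1, 2)),
--     (-1699, -1683, -1, (0, 3), 0, ()),
--     (-1683, -1651, -1, (0, 2, 3), 0, ()),
--     (-1651, -1615, -1, (0, 1, 2, 3), 0, ()),
--     (-1615, -1583, -2, (0,), -1, (1, 2, 3)),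
--     (-1583, -1551, -2, (0, 3), -1, (1, 2)),
--     (-1551, -1519, -2, (0, 2, 3), -1, (1,)),
--     (-1519, -1499, -2, (0, 1, 2, 3), 0, ()),
--     (-1499, -1483, -1, (0, 1, 2, 3), 0, ()),
--     (-1483, -1451, -2, (0,), -1, (1, 2, 3)),
--     (-1451, -1435, -2, (0, 3), -1, (1, 2)),
--     (-1435, -1415, -2, (0, 3), -1, (1, 2)),
--     (-1415, -1399, -2, (0, 2, 3), -1, (1,)),
--     (-1399, -1383, -1, (0, 2, 3), 0, ()),
--     (-1383, -1347, -1, (0, 1, 2, 3), 0, ()),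
--     (-1347, -1315, -2, (0,), -1, (1, 2, 3)),
--     (-1315, -1299, -2, (0, 3), -1, (1, 2)),
--     (-1299, -1283, -1, (0, 3), 0, ()),
--     (-1283, -1251, -1, (0, 2, 3), 0, ()),
--     (-1251, -1215, -1, (0, 1, 2, 3), 0, ()),
--     (-1215, -1183, -2, (0,), -1, (1, 2, 3)),
--     (-1183, -1151, -2, (0, 3), -1, (1, 2)),
--     (-1151, -1119, -2, (0, 2, 3), -1, (1,)),
--     (-1119, -1099, -2, (0, 1, 2, 3), 0, ()),
--     (-1099, -1083, -1, (0, 1, 2, 3), 0, ()),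
--     (-1083, -1051, -2, (0,), -1, (1, 2, 3)),
--     (-1051, -1019, -2, (0, 3), -1, (1, 2)),
--     (-1019, -999, -2, (0, 2, 3), -1, (1,)),
--     (-999, -983, -1, (0, 2, 3), 0, ()),
--     (-983, -947, -1, (0, 1, 2, 3), 0, ()),
--     (-947, -915, -2, (0,), -1, (1, 2, 3)),
--     (-915, -899, -2, (0, 3), -1, (1, 2)),
--     (-899, -883, -1, (0, 3), 0, ()),
--     (-883, -851, -1, (0, 2, 3), 0, ()),
--     (-851, -815, -1, (0, 1, 2, 3), 0, ()),
--     (-815, -783, -2, (0,), -1, (1, 2, 3)),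
--     (-783, -751, -2, (0, 3), -1, (1, 2)),
--     (-751, -719, -2, (0, 2, 3), -1, (1,)),
--     (-719, -699, -2, (0, 1, 2, 3), 0, ()),
--     (-699, -683, -1, (0, 1, 2, 3), 0, ()),
--     (-683, -651, -2, (0,), -1, (1, 2, 3)),
--     (-651, -619, -2, (0, 3), -1, (1, 2)),
--     (-619, -599, -2, (0, 2, 3), -1, (1,)),
--     (-599, -583, -1, (0, 2, 3), 0, ()),
--     (-583, -547, -1, (0, 1, 2, 3), 0, ()),
--     (-547, -515, -2, (0,), -1, (1, 2, 3)),
--     (-515, -499, -2, (0, 3), -1, (1, 2)),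
--     (-499, -483, -1, (0, 3), 0, ()),
--     (-483, -451, -1, (0, 2, 3), 0, ()),
--     (-451, -415, -1, (0, 1, 2, 3), 0, ()),
--     (-415, -383, -2, (0,), -1, (1, 2, 3)),
--     (-383, -351, -2, (0, 3), -1, (1, 2)),
--     (-351, -319, -2, (0, 2, 3), -1, (1,)),
--     (-319, -299, -2, (0, 1, 2, 3), 0, ()),
--     (-299, -283, -1, (0, 1, 2, 3), 0, ()),
--     (-283, -243, -2, (0,), -1, (1, 2, 3)),
--     (-243, -211, -2, (0, 3), -1, (1, 2)),
--     (-211, -199, -2, (0, 2, 3), -1, (1,)),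
--     (-199, -179, -1, (0, 2, 3), 0, ()),
--     (-179, -143, -1, (0, 1, 2, 3), 0, ()),
--     (-143, -111, -2, (0,), -1, (1, 2, 3)),
--     (-111, -99, -2, (0, 3), -1, (1, 2)),
--     (-99, -79, -1, (0, 3), 0, ()),
--     (-79, -47, -1, (0, 2, 3), 0, ()),
--     (-47, -11, -1, (0, 1, 2, 3), 0, ()),
--     (-11, 21, -2, (0,), -1, (1, 2, 3)),
--     (21, 53, -2, (0, 3), -1, (1, 2)),
--     (53, 85, -2, (0, 2, 3), -1, (1,)),
--     (85, 101, -2, (0, 1, 2, 3), 0, ()),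
--     (101, 117, -1, (0, 1, 2, 3), 0, ()),
--     (117, 149, -2, (0,), -1, (1, 2, 3)),
--     (149, 185, -2, (0, 3), -1, (1, 2)),
--     (185, 201, -2, (0, 2, 3), -1, (1,)),
--     (201, 213, -1, (0, 2, 3), 0, ()),
--     (213, 249, -1, (0, 1, 2, 3), 0, ()),
--     (249, 281, -2, (0,), -1, (1, 2, 3)),
--     (281, 301, -2, (0, 3), -1, (1, 2)),
--     (301, 313, -1, (0, 3), 0, ()),
--     (313, 345, -1, (0, 2, 3), 0, ()),
--     (345, 381, -1, (0, 1, 2, 3), 0, ()),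
--     (381, 413, -2, (0,), -1, (1, 2, 3)),
--     (413, 445, -2, (0, 3), -1, (1, 2)),
--     (445, 477, -2, (0, 2, 3), -1, (1,)),
--     (477, 501, -2, (0, 1, 2, 3), 0, ()),
--     (501, 513, -1, (0, 1, 2, 3), 0, ()),
--     (513, 545, -2, (0,), -1, (1, 2, 3)),
--     (545, 577, -2, (0, 3), -1, (1, 2)),
--     (577, 601, -2, (0, 2, 3), -1, (1,)),
--     (601, 609, -1, (0, 2, 3), 0, ()),
--     (609, 645, -1, (0, 1, 2, 3), 0, ()),
--     (645, 677, -2, (0,), -1, (1, 2, 3)),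
--     (677, 701, -2, (0, 3), -1, (1, 2)),
--     (701, 709, -1, (0, 3), 0, ()),
--     (709, 741, -1, (0, 2, 3), 0, ()),
--     (741, 777, -1, (0, 1, 2, 3), 0, ()),
--     (777, 809, -2, (0,), -1, (1, 2, 3)),
--     (809, 841, -2, (0, 3), -1, (1, 2)),
--     (841, 873, -2, (0, 2, 3), -1, (1,)),
--     (873, 901, -2, (0, 1, 2, 3), 0, ()),
--     (901, 909, -1, (0, 1, 2, 3), 0, ()),
--     (909, 941, -2, (0,), -1, (1, 2, 3)),
--     (941, 973, -2, (0, 3), -1, (1, 2)),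
--     (973, 1001, -2, (0, 2, 3), -1, (1,)),
--     (1001, 1005, -1, (0, 2, 3), 0, ()),
--     (1005, 1041, -1, (0, 1, 2, 3), 0, ()),
--     (1041, 1073, -2, (0,), -1, (1, 2, 3)),
--     (1073, 1101, -2, (0, 3), -1, (1, 2)),
--     (1101, 1105, -1, (0, 3), 0, ()),
--     (1105, 1137, -1, (0, 2, 3), 0, ()),
--     (1137, 1162, -1, (0, 1, 2, 3), 0, ()),
-- )
--
--
-- def _get_coff(year: int) -> int:
--     # rightmost record with start <= year
--     lo, hi = 0, len(_RECORDS)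
--     while lo < hi:
--         mid = (lo + hi) // 2
--         if _RECORDS[mid][0] <= year:
--             lo = mid + 1
--         else:
--             hi = mid
--     if lo:
--         start, end, a, onoff0, b, onoff1 = _RECORDS[lo - 1]
--         if year < end:
--             d = end - year
--             if 0 < d < 100 and d % 4 in onoff0:
--                 return a
--             if 0 < d < 100 and d % 4 in onoff1:
--                 return b
--     return 0
-- ===== Notes on version B (the rewrite author's own statement) =====
-- stated objective: alternative
-- what changed: The seven sequential linear table passes are replaced by a rightmost-start binary search over one sorted table of pairwise-disjoint interval records (the single nested duplicate interval in p2111, which carries identical end and coefficients, is merged away), followed by a direct candidate computation on the unique containing record.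
import Mathlib
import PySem

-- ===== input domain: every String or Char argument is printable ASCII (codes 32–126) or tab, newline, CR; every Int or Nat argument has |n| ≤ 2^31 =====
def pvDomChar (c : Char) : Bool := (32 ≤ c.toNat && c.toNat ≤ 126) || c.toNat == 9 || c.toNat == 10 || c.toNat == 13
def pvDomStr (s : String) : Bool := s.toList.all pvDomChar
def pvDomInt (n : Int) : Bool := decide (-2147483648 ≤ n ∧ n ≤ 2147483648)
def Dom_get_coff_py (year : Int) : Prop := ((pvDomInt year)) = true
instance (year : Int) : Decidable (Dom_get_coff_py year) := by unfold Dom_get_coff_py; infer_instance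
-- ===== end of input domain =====

-- B replaces A's seven sequential linear table passes by a binary search over one
-- sorted table of disjoint interval records, then computes the candidate directly.

-- ===== PORT A =====
-- process_segment: lambda func is 0 < y < 100 and y % 4 in onoff
def pvProcessSegment (y : Int) (a : Int) (onoff0 : List Int) (b : Int) (onoff1 : List Int) : Int :=
  if a ≠ 0 ∧ (0 < y ∧ y < 100) ∧ (PySem.Int.mod y 4) ∈ onoff0 then a
  else if b ≠ 0 ∧ (0 < y ∧ y < 100) ∧ (PySem.Int.mod y 4) ∈ onoff1 then b
  else 0

-- process_segments: for-loop over pn; 'year in range(start, end)' is start ≤ year < end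
def pvProcessSegments (year : Int) (pn : List (Int × Int)) (a : Int) (onoff0 : List Int)
    (b : Int) (onoff1 : List Int) : Int :=
  pn.foldl (fun coff p =>
    if p.1 ≤ year ∧ year < p.2 then
      let coff0 := pvProcessSegment (p.2 - year) a onoff0 0 []
      let coff1 := pvProcessSegment (p.2 - year) 0 [] b onoff1
      if coff0 ≠ 0 then coff0 else coff1
    else coff) 0

def pvP1 : List (Int × Int) :=
  [(-1783, -1747), (-1651, -1615), (-1499, -1483), (-1383, -1347),
   (-1251, -1215), (-1099, -1083), (-983, -947), (-851, -815),
   (-699, -683), (-583, -547), (-451, -415), (-299, -283),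
   (-179, -143), (-47, -11), (101, 117), (213, 249), (345, 381),
   (501, 513), (609, 645), (741, 777), (901, 909), (1005, 1041),
   (1137, 1162)]
def pvP1100 : List (Int × Int) :=
  [(-1699, -1683), (-1299, -1283), (-899, -883), (-499, -483),
   (-99, -79), (301, 313), (701, 709), (1101, 1105)]
def pvP1110 : List (Int × Int) :=
  [(-1799, -1783), (-1683, -1651), (-1399, -1383),
   (-1283, -1251), (-999, -983), (-883, -851), (-599, -583),
   (-483, -451), (-199, -179), (-79, -47), (201, 213),
   (313, 345), (601, 609), (709, 741), (1001, 1005),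
   (1105, 1137)]
def pvP2 : List (Int × Int) :=
  [(-1519, -1499), (-1119, -1099), (-319, -299), (-719, -699),
   (85, 101), (477, 501), (873, 901)]
def pvP2111 : List (Int × Int) :=
  [(-1747, -1715), (-1615, -1583), (-1483, -1451),
   (-1347, -1315), (-1327, -1315), (-1215, -1183),
   (-1083, -1051), (-947, -915), (-815, -783), (-683, -651),
   (-547, -515), (-415, -383), (-283, -243), (-143, -111),
   (-11, 21), (117, 149), (249, 281), (381, 413), (513, 545),
   (645, 677), (777, 809), (909, 941), (1041, 1073)]
def pvP2211 : List (Int × Int) :=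
  [(-1843, -1815), (-1715, -1699), (-1583, -1551),
   (-1451, -1435), (-1435, -1415), (-1315, -1299),
   (-1183, -1151), (-1051, -1019), (-915, -899), (-783, -751),
   (-651, -619), (-515, -499), (-383, -351), (-243, -211),
   (-111, -99), (21, 53), (149, 185), (281, 301), (413, 445),
   (545, 577), (677, 701), (809, 841), (941, 973), (1073, 1101)]
def pvP2221 : List (Int × Int) :=
  [(-1815, -1799), (-1551, -1519), (-1415, -1399),
   (-1151, -1119), (-1019, -999), (-751, -719), (-619, -599),
   (-351, -319), (-211, -199), (53, 85), (185, 201), (445, 477),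
   (577, 601), (841, 873), (973, 1001)]

def get_coff_py (year : Int) : Int :=
  let coff : Int := 0
  let coff := if coff = 0 then pvProcessSegments year pvP1 (-1) [0, 1, 2, 3] 0 [] else coff
  let coff := if coff = 0 then pvProcessSegments year pvP1100 (-1) [0, 3] 0 [] else coff
  let coff := if coff = 0 then pvProcessSegments year pvP1110 (-1) [0, 2, 3] 0 [] else coff
  let coff := if coff = 0 then pvProcessSegments year pvP2 (-2) [0, 1, 2, 3] 0 [] else coff
  let coff := if coff = 0 then pvProcessSegments year pvP2111 (-2) [0] (-1) [1, 2, 3] else coff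
  let coff := if coff = 0 then pvProcessSegments year pvP2211 (-2) [0, 3] (-1) [1, 2] else coff
  let coff := if coff = 0 then pvProcessSegments year pvP2221 (-2) [0, 2, 3] (-1) [1] else coff
  coff

-- ===== PORT B =====
-- record: (start, end, a, onoff0, b, onoff1); Source B's single sorted table _RECORDS
set_option maxHeartbeats 1000000 in
def pvRecords : List (Int × Int × Int × List Int × Int × List Int) := [
  (-1843, -1815, -2, [0, 3], -1, [1, 2]),
  (-1815, -1799, -2, [0, 2, 3], -1, [1]),
  (-1799, -1783, -1, [0, 2, 3], 0, []),
  (-1783, -1747, -1, [0, 1, 2, 3], 0, []),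
  (-1747, -1715, -2, [0], -1, [1, 2, 3]),
  (-1715, -1699, -2, [0, 3], -1, [1, 2]),
  (-1699, -1683, -1, [0, 3], 0, []),
  (-1683, -1651, -1, [0, 2, 3], 0, []),
  (-1651, -1615, -1, [0, 1, 2, 3], 0, []),
  (-1615, -1583, -2, [0], -1, [1, 2, 3]),
  (-1583, -1551, -2, [0, 3], -1, [1, 2]),
  (-1551, -1519, -2, [0, 2, 3], -1, [1]),
  (-1519, -1499, -2, [0, 1, 2, 3], 0, []),
  (-1499, -1483, -1, [0, 1, 2, 3], 0, []),
  (-1483, -1451, -2, [0], -1, [1, 2, 3]),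
  (-1451, -1435, -2, [0, 3], -1, [1, 2]),
  (-1435, -1415, -2, [0, 3], -1, [1, 2]),
  (-1415, -1399, -2, [0, 2, 3], -1, [1]),
  (-1399, -1383, -1, [0, 2, 3], 0, []),
  (-1383, -1347, -1, [0, 1, 2, 3], 0, []),
  (-1347, -1315, -2, [0], -1, [1, 2, 3]),
  (-1315, -1299, -2, [0, 3], -1, [1, 2]),
  (-1299, -1283, -1, [0, 3], 0, []),
  (-1283, -1251, -1, [0, 2, 3], 0, []),
  (-1251, -1215, -1, [0, 1, 2, 3], 0, []),
  (-1215, -1183, -2, [0], -1, [1, 2, 3]),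
  (-1183, -1151, -2, [0, 3], -1, [1, 2]),
  (-1151, -1119, -2, [0, 2, 3], -1, [1]),
  (-1119, -1099, -2, [0, 1, 2, 3], 0, []),
  (-1099, -1083, -1, [0, 1, 2, 3], 0, []),
  (-1083, -1051, -2, [0], -1, [1, 2, 3]),
  (-1051, -1019, -2, [0, 3], -1, [1, 2]),
  (-1019, -999, -2, [0, 2, 3], -1, [1]),
  (-999, -983, -1, [0, 2, 3], 0, []),
  (-983, -947, -1, [0, 1, 2, 3], 0, []),
  (-947, -915, -2, [0], -1, [1, 2, 3]),
  (-915, -899, -2, [0, 3], -1, [1, 2]),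
  (-899, -883, -1, [0, 3], 0, []),
  (-883, -851, -1, [0, 2, 3], 0, []),
  (-851, -815, -1, [0, 1, 2, 3], 0, []),
  (-815, -783, -2, [0], -1, [1, 2, 3]),
  (-783, -751, -2, [0, 3], -1, [1, 2]),
  (-751, -719, -2, [0, 2, 3], -1, [1]),
  (-719, -699, -2, [0, 1, 2, 3], 0, []),
  (-699, -683, -1, [0, 1, 2, 3], 0, []),
  (-683, -651, -2, [0], -1, [1, 2, 3]),
  (-651, -619, -2, [0, 3], -1, [1, 2]),
  (-619, -599, -2, [0, 2, 3], -1, [1]),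
  (-599, -583, -1, [0, 2, 3], 0, []),
  (-583, -547, -1, [0, 1, 2, 3], 0, []),
  (-547, -515, -2, [0], -1, [1, 2, 3]),
  (-515, -499, -2, [0, 3], -1, [1, 2]),
  (-499, -483, -1, [0, 3], 0, []),
  (-483, -451, -1, [0, 2, 3], 0, []),
  (-451, -415, -1, [0, 1, 2, 3], 0, []),
  (-415, -383, -2, [0], -1, [1, 2, 3]),
  (-383, -351, -2, [0, 3], -1, [1, 2]),
  (-351, -319, -2, [0, 2, 3], -1, [1]),
  (-319, -299, -2, [0, 1, 2, 3], 0, []),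
  (-299, -283, -1, [0, 1, 2, 3], 0, []),
  (-283, -243, -2, [0], -1, [1, 2, 3]),
  (-243, -211, -2, [0, 3], -1, [1, 2]),
  (-211, -199, -2, [0, 2, 3], -1, [1]),
  (-199, -179, -1, [0, 2, 3], 0, []),
  (-179, -143, -1, [0, 1, 2, 3], 0, []),
  (-143, -111, -2, [0], -1, [1, 2, 3]),
  (-111, -99, -2, [0, 3], -1, [1, 2]),
  (-99, -79, -1, [0, 3], 0, []),
  (-79, -47, -1, [0, 2, 3], 0, []),
  (-47, -11, -1, [0, 1, 2, 3], 0, []),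
  (-11, 21, -2, [0], -1, [1, 2, 3]),
  (21, 53, -2, [0, 3], -1, [1, 2]),
  (53, 85, -2, [0, 2, 3], -1, [1]),
  (85, 101, -2, [0, 1, 2, 3], 0, []),
  (101, 117, -1, [0, 1, 2, 3], 0, []),
  (117, 149, -2, [0], -1, [1, 2, 3]),
  (149, 185, -2, [0, 3], -1, [1, 2]),
  (185, 201, -2, [0, 2, 3], -1, [1]),
  (201, 213, -1, [0, 2, 3], 0, []),
  (213, 249, -1, [0, 1, 2, 3], 0, []),
  (249, 281, -2, [0], -1, [1, 2, 3]),
  (281, 301, -2, [0, 3], -1, [1, 2]),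
  (301, 313, -1, [0, 3], 0, []),
  (313, 345, -1, [0, 2, 3], 0, []),
  (345, 381, -1, [0, 1, 2, 3], 0, []),
  (381, 413, -2, [0], -1, [1, 2, 3]),
  (413, 445, -2, [0, 3], -1, [1, 2]),
  (445, 477, -2, [0, 2, 3], -1, [1]),
  (477, 501, -2, [0, 1, 2, 3], 0, []),
  (501, 513, -1, [0, 1, 2, 3], 0, []),
  (513, 545, -2, [0], -1, [1, 2, 3]),
  (545, 577, -2, [0, 3], -1, [1, 2]),
  (577, 601, -2, [0, 2, 3], -1, [1]),
  (601, 609, -1, [0, 2, 3], 0, []),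
  (609, 645, -1, [0, 1, 2, 3], 0, []),
  (645, 677, -2, [0], -1, [1, 2, 3]),
  (677, 701, -2, [0, 3], -1, [1, 2]),
  (701, 709, -1, [0, 3], 0, []),
  (709, 741, -1, [0, 2, 3], 0, []),
  (741, 777, -1, [0, 1, 2, 3], 0, []),
  (777, 809, -2, [0], -1, [1, 2, 3]),
  (809, 841, -2, [0, 3], -1, [1, 2]),
  (841, 873, -2, [0, 2, 3], -1, [1]),
  (873, 901, -2, [0, 1, 2, 3], 0, []),
  (901, 909, -1, [0, 1, 2, 3], 0, []),
  (909, 941, -2, [0], -1, [1, 2, 3]),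
  (941, 973, -2, [0, 3], -1, [1, 2]),
  (973, 1001, -2, [0, 2, 3], -1, [1]),
  (1001, 1005, -1, [0, 2, 3], 0, []),
  (1005, 1041, -1, [0, 1, 2, 3], 0, []),
  (1041, 1073, -2, [0], -1, [1, 2, 3]),
  (1073, 1101, -2, [0, 3], -1, [1, 2]),
  (1101, 1105, -1, [0, 3], 0, []),
  (1105, 1137, -1, [0, 2, 3], 0, []),
  (1137, 1162, -1, [0, 1, 2, 3], 0, [])]

-- the while-loop of Source B: rightmost index whose record start is ≤ year.
-- fuel = hi - lo bounds the iteration count (totality device only; hi - lo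
-- strictly decreases each turn, so the fuel never runs out before lo ≥ hi).
def pvBSearch (year : Int) : Nat → Nat → Nat → Nat
  | 0, lo, _ => lo
  | fuel + 1, lo, hi =>
    if lo < hi then
      if (pvRecords.getD ((lo + hi) / 2) (0, 0, 0, [], 0, [])).1 ≤ year then
        pvBSearch year fuel ((lo + hi) / 2 + 1) hi
      else pvBSearch year fuel lo ((lo + hi) / 2)
    else lo

def get_coff_py_alt (year : Int) : Int :=
  let lo := pvBSearch year pvRecords.length 0 pvRecords.length
  if lo ≠ 0 then
    let r := pvRecords.getD (lo - 1) (0, 0, 0, [], 0, [])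
    if year < r.2.1 then
      let d := r.2.1 - year
      if (0 < d ∧ d < 100) ∧ (PySem.Int.mod d 4) ∈ r.2.2.2.1 then r.2.2.1
      else if (0 < d ∧ d < 100) ∧ (PySem.Int.mod d 4) ∈ r.2.2.2.2.2 then r.2.2.2.2.1
      else 0
    else 0
  else 0

-- ===== PRECONDITION & SPEC =====
def Spec_get_coff_py (year : Int) (out : Int) : Prop := out = get_coff_py_alt year
instance (year : Int) (out : Int) : Decidable (Spec_get_coff_py year out) := by unfold Spec_get_coff_py; infer_instance

-- ===== CLAIM (what is proved, stated in full; the proofs are below) =====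
def Claim_equal_get_coff_py : Prop := ∀ (year : Int), Dom_get_coff_py year → Spec_get_coff_py year (get_coff_py year)

-- ===== LEMMAS AND PROOFS =====

-- a foldl whose every step fixes v stays at v
theorem pvFoldlFix {α β : Type} (f : α → β → α) (l : List β) (v : α)
    (h : ∀ q ∈ l, f v q = v) : l.foldl f v = v := by
  induction l with
  | nil => rfl
  | cons q rest ih =>
    simp only [List.foldl_cons, h q (List.mem_cons_self ..)]
    exact ih (fun r hr => h r (List.mem_cons_of_mem _ hr))

-- a table whose intervals all lie in [-1843, 1162) yields 0 on an out-of-range year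
theorem pvNoMatch (year : Int) (h : year < -1843 ∨ 1162 ≤ year)
    (pn : List (Int × Int)) (hb : ∀ q ∈ pn, -1843 ≤ q.1 ∧ q.2 ≤ 1162)
    (a : Int) (o0 : List Int) (b : Int) (o1 : List Int) :
    pvProcessSegments year pn a o0 b o1 = 0 := by
  unfold pvProcessSegments
  exact pvFoldlFix _ _ _ (fun q hq => if_neg (by have := hb q hq; omega))

-- A returns 0 outside [-1843, 1162)
theorem pvA_out (year : Int) (h : year < -1843 ∨ 1162 ≤ year) : get_coff_py year = 0 := by
  have e1 := pvNoMatch year h pvP1 (by decide) (-1) [0, 1, 2, 3] 0 []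
  have e2 := pvNoMatch year h pvP1100 (by decide) (-1) [0, 3] 0 []
  have e3 := pvNoMatch year h pvP1110 (by decide) (-1) [0, 2, 3] 0 []
  have e4 := pvNoMatch year h pvP2 (by decide) (-2) [0, 1, 2, 3] 0 []
  have e5 := pvNoMatch year h pvP2111 (by decide) (-2) [0] (-1) [1, 2, 3]
  have e6 := pvNoMatch year h pvP2211 (by decide) (-2) [0, 3] (-1) [1, 2]
  have e7 := pvNoMatch year h pvP2221 (by decide) (-2) [0, 2, 3] (-1) [1]
  unfold get_coff_py
  simp only [e1, e2, e3, e4, e5, e6, e7, if_pos]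

-- every record of B's table lies inside [-1843, 1162)
theorem pvRecordsBounded : ∀ q ∈ pvRecords, -1843 ≤ q.1 ∧ q.2.1 ≤ 1162 := by decide

-- binary-search bounds: the result lies in [lo, hi]
theorem pvBSearch_bounds (year : Int) : ∀ fuel lo hi, lo ≤ hi →
    lo ≤ pvBSearch year fuel lo hi ∧ pvBSearch year fuel lo hi ≤ hi := by
  intro fuel
  induction fuel with
  | zero => intro lo hi hle; simp [pvBSearch]; omega
  | succ n ih =>
    intro lo hi hle
    rw [pvBSearch]
    by_cases h : lo < hi
    · rw [if_pos h]
      split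
      · have := ih ((lo + hi) / 2 + 1) hi (by omega)
        omega
      · have := ih lo ((lo + hi) / 2) (by omega)
        omega
    · rw [if_neg h]; omega

-- if every record below hi has start > year, the search returns lo
theorem pvBSearch_all_gt (year : Int) : ∀ fuel lo hi,
    (∀ i, i < hi → year < (pvRecords.getD i (0, 0, 0, [], 0, [])).1) →
    pvBSearch year fuel lo hi = lo := by
  intro fuel
  induction fuel with
  | zero => intro lo hi _; rfl
  | succ n ih =>
    intro lo hi hall
    rw [pvBSearch]
    by_cases h : lo < hi
    · rw [if_pos h]
      have hm := hall ((lo + hi) / 2) (by omega)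
      rw [if_neg (by omega)]
      exact ih lo ((lo + hi) / 2) (fun i hilt => hall i (by omega))
    · rw [if_neg h]

-- B returns 0 below the table
theorem pvB_out_lo (year : Int) (h : year < -1843) : get_coff_py_alt year = 0 := by
  have hz : pvBSearch year pvRecords.length 0 pvRecords.length = 0 :=
    pvBSearch_all_gt year pvRecords.length 0 pvRecords.length (fun i hi => by
      have hm : pvRecords.getD i (0, 0, 0, [], 0, []) ∈ pvRecords := by
        rw [List.getD_eq_getElem _ _ hi]; exact List.getElem_mem hi
      have := pvRecordsBounded _ hm
      omega)
  unfold get_coff_py_alt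
  simp [hz]

-- B returns 0 above the table
theorem pvB_out_hi (year : Int) (h : 1162 ≤ year) : get_coff_py_alt year = 0 := by
  have hb := pvBSearch_bounds year pvRecords.length 0 pvRecords.length (by omega)
  unfold get_coff_py_alt
  by_cases hz : pvBSearch year pvRecords.length 0 pvRecords.length = 0
  · simp [hz]
  · have hlt : pvBSearch year pvRecords.length 0 pvRecords.length - 1 < pvRecords.length := by omega
    have hm : pvRecords.getD (pvBSearch year pvRecords.length 0 pvRecords.length - 1) (0, 0, 0, [], 0, [])
        ∈ pvRecords := by
      rw [List.getD_eq_getElem _ _ hlt]; exact List.getElem_mem hlt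
    have hbnd := pvRecordsBounded _ hm
    simp only [ne_eq, hz, not_false_iff, if_true]
    rw [if_neg (by omega)]

-- a 301-year chunk check lifted to an interval statement
theorem pvChunkLift (lo : Int)
    (h : ∀ n ∈ List.range 301, get_coff_py (lo + (n : Int)) = get_coff_py_alt (lo + (n : Int))) :
    ∀ year, lo ≤ year → year < lo + 301 → get_coff_py year = get_coff_py_alt year := by
  intro year h1 h2
  have hm : (year - lo).toNat ∈ List.range 301 := by
    simp only [List.mem_range]; omega
  have hv := h _ hm
  have he : lo + (((year - lo).toNat : Nat) : Int) = year := by omega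
  rwa [he] at hv

-- inside [-1843, 1167) the two programs agree, checked exhaustively in ten chunks
set_option maxHeartbeats 2000000 in
set_option maxRecDepth 4000 in
theorem pvChunk0 : ∀ n ∈ List.range 301,
    get_coff_py (-1843 + (n : Int)) = get_coff_py_alt (-1843 + (n : Int)) := by decide

set_option maxHeartbeats 2000000 in
set_option maxRecDepth 4000 in
theorem pvChunk1 : ∀ n ∈ List.range 301,
    get_coff_py (-1542 + (n : Int)) = get_coff_py_alt (-1542 + (n : Int)) := by decide

set_option maxHeartbeats 2000000 in
set_option maxRecDepth 4000 in
theorem pvChunk2 : ∀ n ∈ List.range 301,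
    get_coff_py (-1241 + (n : Int)) = get_coff_py_alt (-1241 + (n : Int)) := by decide

set_option maxHeartbeats 2000000 in
set_option maxRecDepth 4000 in
theorem pvChunk3 : ∀ n ∈ List.range 301,
    get_coff_py (-940 + (n : Int)) = get_coff_py_alt (-940 + (n : Int)) := by decide

set_option maxHeartbeats 2000000 in
set_option maxRecDepth 4000 in
theorem pvChunk4 : ∀ n ∈ List.range 301,
    get_coff_py (-639 + (n : Int)) = get_coff_py_alt (-639 + (n : Int)) := by decide

set_option maxHeartbeats 2000000 in
set_option maxRecDepth 4000 in
theorem pvChunk5 : ∀ n ∈ List.range 301,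
    get_coff_py (-338 + (n : Int)) = get_coff_py_alt (-338 + (n : Int)) := by decide

set_option maxHeartbeats 2000000 in
set_option maxRecDepth 4000 in
theorem pvChunk6 : ∀ n ∈ List.range 301,
    get_coff_py (-37 + (n : Int)) = get_coff_py_alt (-37 + (n : Int)) := by decide

set_option maxHeartbeats 2000000 in
set_option maxRecDepth 4000 in
theorem pvChunk7 : ∀ n ∈ List.range 301,
    get_coff_py (264 + (n : Int)) = get_coff_py_alt (264 + (n : Int)) := by decide

set_option maxHeartbeats 2000000 in
set_option maxRecDepth 4000 in
theorem pvChunk8 : ∀ n ∈ List.range 301,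
    get_coff_py (565 + (n : Int)) = get_coff_py_alt (565 + (n : Int)) := by decide

set_option maxHeartbeats 2000000 in
set_option maxRecDepth 4000 in
theorem pvChunk9 : ∀ n ∈ List.range 301,
    get_coff_py (866 + (n : Int)) = get_coff_py_alt (866 + (n : Int)) := by decide

theorem pvRangeCheck : ∀ year : Int, -1843 ≤ year → year < 1167 →
    get_coff_py year = get_coff_py_alt year := by
  intro year h1 h2
  by_cases c0 : year < -1542
  · exact pvChunkLift (-1843) pvChunk0 year (by omega) (by omega)
  by_cases c1 : year < -1241
  · exact pvChunkLift (-1542) pvChunk1 year (by omega) (by omega)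
  by_cases c2 : year < -940
  · exact pvChunkLift (-1241) pvChunk2 year (by omega) (by omega)
  by_cases c3 : year < -639
  · exact pvChunkLift (-940) pvChunk3 year (by omega) (by omega)
  by_cases c4 : year < -338
  · exact pvChunkLift (-639) pvChunk4 year (by omega) (by omega)
  by_cases c5 : year < -37
  · exact pvChunkLift (-338) pvChunk5 year (by omega) (by omega)
  by_cases c6 : year < 264
  · exact pvChunkLift (-37) pvChunk6 year (by omega) (by omega)
  by_cases c7 : year < 565
  · exact pvChunkLift (264) pvChunk7 year (by omega) (by omega)
  by_cases c8 : year < 866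
  · exact pvChunkLift (565) pvChunk8 year (by omega) (by omega)
  exact pvChunkLift (866) pvChunk9 year (by omega) (by omega)

-- ===== VERDICT (by name: the statement is the Claim_ definition above) =====
theorem get_coff_py_spec : Claim_equal_get_coff_py := by
  intro year _
  unfold Spec_get_coff_py
  by_cases hlo : year < -1843
  · rw [pvA_out year (Or.inl hlo), pvB_out_lo year hlo]
  · by_cases hhi : 1162 ≤ year
    · rw [pvA_out year (Or.inr hhi), pvB_out_hi year hhi]
    · exact pvRangeCheck year (by omega) (by omega)
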